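-- pv_equiv track=rewrite | github.com/KouMiaoshark/newfaith | _data/tiq/tsf_annotation/219_2auto_retirval_log.py | extract_answer_labels_and_qids
-- ===== SOURCE A (Python) =====
-- from typing import Any, Dict, List, Optional, Tuple
--
-- def extract_answer_labels_and_qids(item: Dict[str, Any]) -> Tuple[List[str], List[str]]:
--     labels: List[str] = []
--     qids: List[str] = []
--     for ans in item.get("Answer", []) or []:
--         lab = ans.get("WikidataLabel")
--         aqid = ans.get("WikidataQid")
--         if lab:
--             labels.append(str(lab).strip())
--         if aqid:
--             qids.append(str(aqid).strip())
--
--     def uniq(seq: List[str]) -> List[str]: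
--         seen = set()
--         out = []
--         for x in seq:
--             if x and x not in seen:
--                 out.append(x)
--                 seen.add(x)
--         return out
--
--     return uniq(labels), uniq(qids)
-- ===== SOURCE B (Python) =====
-- def extract_answer_labels_and_qids(item):
--     labels = []
--     qids = []
--     seen_labels = set()
--     seen_qids = set()
--     for ans in item.get("Answer", []) or []:
--         lab = ans.get("WikidataLabel")
--         if lab:
--             s = str(lab).strip()
--             if s and s not in seen_labels:
--                 labels.append(s)
--                 seen_labels.add(s)
--         aqid = ans.get("WikidataQid")
--         if aqid:
--             s = str(aqid).strip()
--             if s and s not in seen_qids: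
--                 qids.append(s)
--                 seen_qids.add(s)
--     return labels, qids
-- ===== Notes on version B (the rewrite author's own statement) =====
-- stated objective: simpler
-- what changed: B fuses A's collect phase and its separate uniq pass into one loop over the answers that appends each stripped value directly, guarded by two seen-sets, eliminating the intermediate lists and the uniq helper.
import Mathlib
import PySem

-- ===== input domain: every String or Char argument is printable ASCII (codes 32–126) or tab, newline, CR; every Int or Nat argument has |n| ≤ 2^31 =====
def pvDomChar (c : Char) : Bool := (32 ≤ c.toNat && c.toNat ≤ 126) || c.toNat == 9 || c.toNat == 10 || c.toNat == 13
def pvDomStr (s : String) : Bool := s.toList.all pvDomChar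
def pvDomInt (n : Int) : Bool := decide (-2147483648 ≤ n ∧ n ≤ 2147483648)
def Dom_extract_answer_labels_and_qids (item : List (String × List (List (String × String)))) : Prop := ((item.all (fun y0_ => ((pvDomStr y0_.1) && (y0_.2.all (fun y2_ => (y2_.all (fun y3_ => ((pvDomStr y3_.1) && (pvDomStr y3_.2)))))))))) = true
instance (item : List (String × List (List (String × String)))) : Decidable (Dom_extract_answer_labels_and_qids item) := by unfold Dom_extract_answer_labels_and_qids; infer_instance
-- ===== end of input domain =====

-- B fuses A's collect-then-uniq two-phase pass into one loop with two seen-sets (objective: simpler).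

-- ===== PORT A =====
-- A's inner helper `uniq`: keep first occurrences of truthy (non-empty) strings.
def pvUniq (seq : List String) : List String :=
  (seq.foldl
    (fun (st : List String × PySem.Set String) x =>
      if x ≠ "" ∧ x ∉ st.2 then (st.1 ++ [x], PySem.Set.add st.2 x) else st)
    ([], ([] : PySem.Set String))).1

def extract_answer_labels_and_qids (item : List (String × List (List (String × String)))) : List String × List String :=
  -- `item.get("Answer", []) or []` : the `or []` is the identity on a list value, ported as getD
  let answers := (PySem.Dict.mk item).getD "Answer" []
  let st := answers.foldl
    (fun (st : List String × List String) ans =>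
      let lab := (PySem.Dict.mk ans).get? "WikidataLabel"
      let aqid := (PySem.Dict.mk ans).get? "WikidataQid"
      let st :=
        match lab with
        | some v => if v ≠ "" then (st.1 ++ [PySem.Str.strip v], st.2) else st
        | none => st
      match aqid with
      | some v => if v ≠ "" then (st.1, st.2 ++ [PySem.Str.strip v]) else st
      | none => st)
    ([], [])
  (pvUniq st.1, pvUniq st.2)

-- ===== PORT B =====
-- B's per-value step: if the value is truthy, strip it and append it unless empty or already seen.
def pvTake (st : List String × PySem.Set String) (v : Option String) :
    List String × PySem.Set String :=
  match v with
  | some v =>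
      if v ≠ "" then
        let s := PySem.Str.strip v
        if s ≠ "" ∧ s ∉ st.2 then (st.1 ++ [s], PySem.Set.add st.2 s) else st
      else st
  | none => st

def extract_answer_labels_and_qids_alt (item : List (String × List (List (String × String)))) : List String × List String :=
  let st := ((PySem.Dict.mk item).getD "Answer" []).foldl
    (fun (st : (List String × PySem.Set String) × (List String × PySem.Set String)) ans =>
      (pvTake st.1 ((PySem.Dict.mk ans).get? "WikidataLabel"),
       pvTake st.2 ((PySem.Dict.mk ans).get? "WikidataQid")))
    (([], ([] : PySem.Set String)), ([], ([] : PySem.Set String)))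
  (st.1.1, st.2.1)

-- ===== PRECONDITION & SPEC =====
def Spec_extract_answer_labels_and_qids (item : List (String × List (List (String × String)))) (out : List String × List String) : Prop := out = extract_answer_labels_and_qids_alt item
instance (item : List (String × List (List (String × String)))) (out : List String × List String) : Decidable (Spec_extract_answer_labels_and_qids item out) := by unfold Spec_extract_answer_labels_and_qids; infer_instance

-- ===== CLAIM (what is proved, stated in full; the proofs are below) =====
def Claim_equal_extract_answer_labels_and_qids : Prop := ∀ (item : List (String × List (List (String × String)))), Dom_extract_answer_labels_and_qids item → Spec_extract_answer_labels_and_qids item (extract_answer_labels_and_qids item)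

-- ===== LEMMAS AND PROOFS =====

-- the contribution one answer makes for a given key: [] or the one stripped value
def pvContrib (key : String) (ans : List (String × String)) : List String :=
  match (PySem.Dict.mk ans).get? key with
  | some v => if v ≠ "" then [PySem.Str.strip v] else []
  | none => []

-- the uniq-step A's helper folds with
def pvStep (st : List String × PySem.Set String) (x : String) :
    List String × PySem.Set String :=
  if x ≠ "" ∧ x ∉ st.2 then (st.1 ++ [x], PySem.Set.add st.2 x) else st

theorem pvUniq_eq_foldl (seq : List String) :
    pvUniq seq = (seq.foldl pvStep ([], ([] : PySem.Set String))).1 := by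
  rfl

-- A's collect loop appends exactly the flat list of contributions
theorem pvA_loop (answers : List (List (String × String))) (la qa : List String) :
    answers.foldl
      (fun (st : List String × List String) ans =>
        let lab := (PySem.Dict.mk ans).get? "WikidataLabel"
        let aqid := (PySem.Dict.mk ans).get? "WikidataQid"
        let st :=
          match lab with
          | some v => if v ≠ "" then (st.1 ++ [PySem.Str.strip v], st.2) else st
          | none => st
        match aqid with
        | some v => if v ≠ "" then (st.1, st.2 ++ [PySem.Str.strip v]) else st
        | none => st)
      (la, qa)
    = (la ++ answers.flatMap (pvContrib "WikidataLabel"),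
       qa ++ answers.flatMap (pvContrib "WikidataQid")) := by
  induction answers generalizing la qa with
  | nil => simp
  | cons a rest ih =>
      simp only [List.foldl_cons, List.flatMap_cons]
      rw [ih]
      unfold pvContrib
      cases h1 : (PySem.Dict.mk a).get? "WikidataLabel" <;>
        cases h2 : (PySem.Dict.mk a).get? "WikidataQid" <;>
        simp <;> split_ifs <;> simp

-- B's per-value step is the fold of A's uniq-step over that value's contribution
theorem pvTake_eq_foldl_contrib (st : List String × PySem.Set String)
    (key : String) (ans : List (String × String)) :
    pvTake st ((PySem.Dict.mk ans).get? key)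
      = (pvContrib key ans).foldl pvStep st := by
  unfold pvTake pvContrib pvStep
  cases h : (PySem.Dict.mk ans).get? key with
  | none => simp
  | some v =>
      dsimp only
      split_ifs <;> simp_all

-- B's loop is the component-wise fold of pvStep over the two flattened contribution lists
theorem pvB_loop (answers : List (List (String × String)))
    (s t : List String × PySem.Set String) :
    answers.foldl
      (fun (st : (List String × PySem.Set String) × (List String × PySem.Set String)) ans =>
        (pvTake st.1 ((PySem.Dict.mk ans).get? "WikidataLabel"),
         pvTake st.2 ((PySem.Dict.mk ans).get? "WikidataQid")))
      (s, t)
    = ((answers.flatMap (pvContrib "WikidataLabel")).foldl pvStep s,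
       (answers.flatMap (pvContrib "WikidataQid")).foldl pvStep t) := by
  induction answers generalizing s t with
  | nil => simp
  | cons a rest ih =>
      simp only [List.foldl_cons, List.flatMap_cons, List.foldl_append]
      rw [pvTake_eq_foldl_contrib, pvTake_eq_foldl_contrib, ih]

-- ===== VERDICT (by name: the statement is the Claim_ definition above) =====
theorem extract_answer_labels_and_qids_spec : Claim_equal_extract_answer_labels_and_qids := by
  intro item _
  unfold Spec_extract_answer_labels_and_qids
  simp only [extract_answer_labels_and_qids, extract_answer_labels_and_qids_alt]
  rw [pvA_loop, pvB_loop]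
  simp [pvUniq_eq_foldl]
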